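-- pv_equiv track=rewrite | github.com/sudiptap/algods | ds_algo/patterns/dynamic_programming/15_counting_combinatorial/solutions/3686-number-of-stable-subsequences.py | numberOfStableSubsequences
-- ===== SOURCE A (Python) =====
-- from typing import List
--
-- MOD = 10**9 + 7
--
-- def numberOfStableSubsequences(nums: List[int], k: int) -> int:
--     n = len(nums)
--     # dp[i] = number of stable subsequences ending at index i
--     dp = [1] * n  # each element alone is a stable subsequence
--
--     for i in range(n):
--         for j in range(i):
--             if abs(nums[i] - nums[j]) <= k:
--                 dp[i] = (dp[i] + dp[j]) % MOD
--
--     return sum(dp) % MOD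
-- ===== SOURCE B (Python) =====
-- MOD = 10**9 + 7
--
-- def numberOfStableSubsequences(nums, k):
--     # One pass with a per-value accumulator: group dp weights by value in a dict,
--     # so each new element scans distinct values instead of all earlier indices.
--     total = 0
--     acc = {}  # value -> sum (mod MOD) of dp over earlier indices holding that value
--     for x in nums:
--         d = (1 + sum(c for v, c in acc.items() if abs(v - x) <= k)) % MOD
--         acc[x] = (acc.get(x, 0) + d) % MOD
--         total = (total + d) % MOD
--     return total
-- ===== Notes on version B (the rewrite author's own statement) =====
-- stated objective: faster
-- what changed: Replaces the O(n^2) dp array with nested index loops by a single pass that groups dp weights by value in a dict, so each element sums over distinct values instead of all earlier indices.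
import Mathlib
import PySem

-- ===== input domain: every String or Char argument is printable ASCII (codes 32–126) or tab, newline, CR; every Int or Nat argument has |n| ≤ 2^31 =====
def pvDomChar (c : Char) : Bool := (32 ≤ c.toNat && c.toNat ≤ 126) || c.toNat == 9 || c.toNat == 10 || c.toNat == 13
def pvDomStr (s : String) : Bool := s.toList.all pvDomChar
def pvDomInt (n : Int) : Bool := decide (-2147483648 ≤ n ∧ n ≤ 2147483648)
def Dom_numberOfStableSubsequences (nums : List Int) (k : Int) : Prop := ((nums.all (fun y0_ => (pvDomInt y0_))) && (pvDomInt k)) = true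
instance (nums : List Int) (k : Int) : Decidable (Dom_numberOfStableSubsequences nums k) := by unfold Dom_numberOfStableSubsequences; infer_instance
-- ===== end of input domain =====

-- B groups dp weights by value in a dict (one pass over distinct values per element)
-- instead of A's nested index loops over a dp array; return values proved equal.

def pvM : Int := 1000000007

-- ===== PORT A =====
def numberOfStableSubsequences (nums : List Int) (k : Int) : Int :=
  let n : Int := (nums.length : Int)
  let dp : List Int := List.replicate nums.length 1
  let dp := (PySem.List.pyRange 0 n 1).foldl (fun dp i =>
    (PySem.List.pyRange 0 i 1).foldl (fun dp j =>
      if |PySem.List.pyGetD nums i 0 - PySem.List.pyGetD nums j 0| ≤ k then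
        PySem.List.pySetD dp i
          (PySem.Int.mod (PySem.List.pyGetD dp i 0 + PySem.List.pyGetD dp j 0) pvM)
      else dp) dp) dp
  PySem.Int.mod (dp.foldl (· + ·) 0) pvM

-- ===== PORT B =====
-- one step of B's loop: consume x, update (total, value→dp-sum dict)
def pvStepB (k : Int) (st : Int × PySem.Dict Int Int) (x : Int) : Int × PySem.Dict Int Int :=
  let d := PySem.Int.mod
    (1 + st.2.items.foldl (fun s p => if |p.1 - x| ≤ k then s + p.2 else s) 0) pvM
  (PySem.Int.mod (st.1 + d) pvM,
   st.2.insert x (PySem.Int.mod (st.2.getD x 0 + d) pvM))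

def numberOfStableSubsequences_alt (nums : List Int) (k : Int) : Int :=
  (nums.foldl (pvStepB k) (0, PySem.Dict.empty)).1

-- ===== PRECONDITION & SPEC =====
def Spec_numberOfStableSubsequences (nums : List Int) (k : Int) (out : Int) : Prop := out = numberOfStableSubsequences_alt nums k
instance (nums : List Int) (k : Int) (out : Int) : Decidable (Spec_numberOfStableSubsequences nums k out) := by unfold Spec_numberOfStableSubsequences; infer_instance

-- ===== CLAIM (what is proved, stated in full; the proofs are below) =====
def Claim_equal_numberOfStableSubsequences : Prop := ∀ (nums : List Int) (k : Int), Dom_numberOfStableSubsequences nums k → Spec_numberOfStableSubsequences nums k (numberOfStableSubsequences nums k)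

-- ===== LEMMAS AND PROOFS =====

-- reference dp: list of (value, dp-weight) pairs, built left to right
def pvMatch (k y : Int) (ps : List (Int × Int)) : Int :=
  ((ps.filter (fun p => |p.1 - y| ≤ k)).map (·.2)).sum

def pvStepP (k : Int) (ps : List (Int × Int)) (x : Int) : List (Int × Int) :=
  ps ++ [(x, (1 + pvMatch k x ps) % pvM)]

def pvPairs (k : Int) (l : List Int) : List (Int × Int) := l.foldl (pvStepP k) []

theorem pvPairs_append_singleton (k : Int) (l : List Int) (x : Int) :
    pvPairs k (l ++ [x]) = pvStepP k (pvPairs k l) x := by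
  simp [pvPairs, List.foldl_append]

theorem pvPairs_len_aux (k : Int) (l : List Int) (init : List (Int × Int)) :
    (l.foldl (pvStepP k) init).length = init.length + l.length := by
  induction l generalizing init with
  | nil => simp
  | cons x t ih => simp [List.foldl_cons, ih, pvStepP]; omega

theorem pvPairs_length (k : Int) (l : List Int) : (pvPairs k l).length = l.length := by
  simpa using pvPairs_len_aux k l []

theorem pvPairs_fst_aux (k : Int) (l : List Int) (init : List (Int × Int)) :
    (l.foldl (pvStepP k) init).map (·.1) = init.map (·.1) ++ l := by
  induction l generalizing init with
  | nil => simp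
  | cons x t ih => simp [List.foldl_cons, ih, pvStepP]

theorem pvPairs_fst (k : Int) (l : List Int) : (pvPairs k l).map (·.1) = l := by
  simpa using pvPairs_fst_aux k l []

-- plain accumulation fold equals filter/map/sum
theorem pv_foldl_if_add (k y : Int) (l : List (Int × Int)) (c : Int) :
    l.foldl (fun s p => if |p.1 - y| ≤ k then s + p.2 else s) c = c + pvMatch k y l := by
  induction l generalizing c with
  | nil => simp [pvMatch]
  | cons p t ih =>
    by_cases h : |p.1 - y| ≤ k <;>
      simp only [List.foldl_cons, h, if_pos, if_neg, not_false_iff, ih,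
        pvMatch, List.filter_cons, decide_true, decide_false] <;>
      simp [pvMatch, h] <;> ring

-- mod-accumulating fold equals (c + matched sum) % M, for 0 ≤ c < M
theorem pv_foldl_if_mod (k y : Int) (l : List (Int × Int)) (c : Int)
    (h0 : 0 ≤ c) (h1 : c < pvM) :
    l.foldl (fun s p => if |p.1 - y| ≤ k then (s + p.2) % pvM else s) c
      = (c + pvMatch k y l) % pvM := by
  induction l generalizing c with
  | nil =>
    simp only [List.foldl_nil, pvMatch, List.filter_nil, List.map_nil, List.sum_nil, add_zero]
    simp only [pvM] at h0 h1 ⊢; omega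
  | cons p t ih =>
    by_cases h : |p.1 - y| ≤ k
    · have hnn : 0 ≤ (c + p.2) % pvM := Int.emod_nonneg _ (by norm_num [pvM])
      have hlt : (c + p.2) % pvM < pvM := Int.emod_lt_of_pos _ (by norm_num [pvM])
      rw [List.foldl_cons, if_pos h, ih _ hnn hlt]
      simp only [pvMatch, List.filter_cons, h, decide_true, if_pos, List.map_cons, List.sum_cons]
      simp only [pvM]; omega
    · rw [List.foldl_cons, if_neg h, ih c h0 h1]
      simp [pvMatch, List.filter_cons, h]

theorem pvMatch_cons (k y : Int) (p : Int × Int) (t : List (Int × Int)) :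
    pvMatch k y (p :: t) = (if |p.1 - y| ≤ k then p.2 else 0) + pvMatch k y t := by
  by_cases h : |p.1 - y| ≤ k <;> simp [pvMatch, List.filter_cons, h]

theorem pvMatch_append_singleton (k y : Int) (l : List (Int × Int)) (q : Int × Int) :
    pvMatch k y (l ++ [q]) = pvMatch k y l + (if |q.1 - y| ≤ k then q.2 else 0) := by
  by_cases h : |q.1 - y| ≤ k <;> simp [pvMatch, List.filter_append, List.filter_cons, h]

-- replacing the unique entry with key x by (x, w) shifts the matched sum by w - old
theorem pv_match_replace (k y x old w : Int) (l : List (Int × Int))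
    (hnd : (l.map (·.1)).Nodup) (hm : (x, old) ∈ l) :
    pvMatch k y (l.map (fun p => if p.1 == x then (x, w) else p))
      = pvMatch k y l + (if |x - y| ≤ k then w - old else 0) := by
  induction l with
  | nil => simp at hm
  | cons p t ih =>
    simp only [List.map_cons, List.nodup_cons] at hnd
    rcases List.mem_cons.mp hm with hp | hp
    · -- p = (x, old)
      have hx : p.1 = x := by rw [← hp]
      have hrest : t.map (fun p => if p.1 == x then (x, w) else p) = t := by
        have : t.map (fun p => if p.1 == x then (x, w) else p) = t.map id := by
          apply List.map_congr_left
          intro q hq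
          have : q.1 ≠ x := by
            intro hqx
            have hq1 : q.1 ∈ t.map (·.1) := List.mem_map_of_mem hq
            rw [hqx, ← hx] at hq1
            exact hnd.1 hq1
          simp [this]
        simpa using this
      rw [List.map_cons, hrest]
      simp only [hx, BEq.rfl, if_pos]
      rw [pvMatch_cons, pvMatch_cons, ← hp]
      simp only [hx]
      by_cases h : |x - y| ≤ k <;> simp [h] <;> ring
    · -- (x, old) ∈ t, so p.1 ≠ x
      have hxt : x ∈ t.map (·.1) := List.mem_map_of_mem (f := (·.1)) hp
      have hpx : p.1 ≠ x := fun h => hnd.1 (h ▸ hxt)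
      rw [List.map_cons, show (if (p.1 == x) = true then (x, w) else p) = p by simp [hpx]]
      rw [pvMatch_cons, pvMatch_cons, ih hnd.2 hp]
      ring

def pvInv (k : Int) (p : List Int) (st : Int × PySem.Dict Int Int) : Prop :=
  st.1 = ((pvPairs k p).map (·.2)).sum % pvM ∧
  st.2.keys.Nodup ∧
  ∀ y, pvMatch k y st.2.items % pvM = pvMatch k y (pvPairs k p) % pvM

theorem pvM_pos : (0:Int) < pvM := by norm_num [pvM]

theorem pvInv_step (k : Int) (p : List Int) (st : Int × PySem.Dict Int Int) (x : Int)
    (h : pvInv k p st) : pvInv k (p ++ [x]) (pvStepB k st x) := by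
  obtain ⟨ht, hnd, hmm⟩ := h
  have hmod : ∀ a : Int, PySem.Int.mod a pvM = a % pvM := fun a => PySem.Int.mod_eq_emod_of_pos pvM_pos
  set pairs := pvPairs k p with hpairs
  have hd : (pvStepB k st x) = ((st.1 + (1 + pvMatch k x st.2.items) % pvM) % pvM,
      st.2.insert x ((st.2.getD x 0 + (1 + pvMatch k x st.2.items) % pvM) % pvM)) := by
    simp only [pvStepB, pv_foldl_if_add, hmod, zero_add]
  have hdref : (1 + pvMatch k x st.2.items) % pvM = (1 + pvMatch k x pairs) % pvM := by
    have := hmm x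
    simp only [pvM] at this ⊢
    omega
  set dref := (1 + pvMatch k x pairs) % pvM with hdrefdef
  have hdb : 0 ≤ dref ∧ dref < pvM :=
    ⟨Int.emod_nonneg _ (by norm_num [pvM]), Int.emod_lt_of_pos _ pvM_pos⟩
  have hnew : pvPairs k (p ++ [x]) = pairs ++ [(x, dref)] := by
    rw [pvPairs_append_singleton]; rfl
  refine ⟨?_, ?_, ?_⟩
  · rw [hd, hnew]
    simp only [List.map_append, List.map_cons, List.map_nil, List.sum_append, List.sum_cons,
      List.sum_nil, add_zero, ht, hdref]
    simp only [pvM] at *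
    omega
  · rw [hd]; exact PySem.Dict.nodup_keys_insert _ _ _ hnd
  · intro y
    rw [hd, hnew, pvMatch_append_singleton]
    simp only [hdref]
    by_cases hc : st.2.contains x
    · -- overwrite: unique entry (x, old) replaced by (x, (old + dref) % pvM)
      obtain ⟨old, hget⟩ : ∃ v, st.2.get? x = some v := by
        rw [PySem.Dict.contains_eq_isSome_get?] at hc; exact Option.isSome_iff_exists.mp hc
      have hold : st.2.getD x 0 = old := PySem.Dict.getD_of_get?_eq_some _ _ hget
      have hmem : (x, old) ∈ st.2.items := PySem.Dict.mem_items_of_get?_eq_some _ hget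
      rw [PySem.Dict.items_insert_of_contains _ _ hc, hold]
      rw [pv_match_replace k y x old _ _ hnd hmem]
      have := hmm y
      by_cases hxy : |x - y| ≤ k <;> simp only [hxy, if_pos, if_neg, not_false_iff] <;>
        simp only [pvM] at this ⊢ <;> omega
    · -- fresh key appended
      rw [PySem.Dict.items_insert_of_not_contains _ _ (by simpa using hc),
        PySem.Dict.getD_of_not_contains _ _ (by simpa using hc)]
      rw [pvMatch_append_singleton]
      have := hmm y
      by_cases hxy : |x - y| ≤ k <;> simp only [hxy, if_pos, if_neg, not_false_iff, zero_add] <;>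
        simp only [pvM] at this ⊢ <;> omega

theorem pvInv_foldl (k : Int) (l : List Int) : ∀ (p : List Int) (st : Int × PySem.Dict Int Int),
    pvInv k p st → pvInv k (p ++ l) (l.foldl (pvStepB k) st) := by
  induction l with
  | nil => intro p st h; simpa using h
  | cons x t ih =>
    intro p st h
    have := ih (p ++ [x]) (pvStepB k st x) (pvInv_step k p st x h)
    simpa [List.append_assoc] using this

theorem alt_char (nums : List Int) (k : Int) :
    numberOfStableSubsequences_alt nums k = ((pvPairs k nums).map (·.2)).sum % pvM := by
  have h0 : pvInv k [] (0, PySem.Dict.empty) := by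
    refine ⟨by simp [pvPairs], PySem.Dict.nodup_keys_empty, fun y => ?_⟩
    have : (PySem.Dict.empty : PySem.Dict Int Int).items = [] := rfl
    simp [pvPairs, pvMatch, this]
  have := pvInv_foldl k nums [] _ h0
  simp only [List.nil_append] at this
  exact this.1

-- the inner loop only rewrites slot i, accumulating the matched prefix weights there
theorem pv_inner (nums : List Int) (k xk : Int) (i : Nat) (dp : List Int) (hi : i < dp.length) :
    ∀ (l : List Int), (∀ j ∈ l, 0 ≤ j ∧ j.toNat < i) → ∀ c : Int,
    l.foldl (fun dp' j => if |xk - PySem.List.pyGetD nums j 0| ≤ k then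
        PySem.List.pySetD dp' (i : Int)
          (PySem.Int.mod (PySem.List.pyGetD dp' (i : Int) 0 + PySem.List.pyGetD dp' j 0) pvM)
      else dp') (dp.set i c)
    = dp.set i (l.foldl (fun s j => if |xk - PySem.List.pyGetD nums j 0| ≤ k then
        (s + PySem.List.pyGetD dp j 0) % pvM else s) c) := by
  intro l
  induction l with
  | nil => intro _ c; rfl
  | cons j t ih =>
    intro hl c
    obtain ⟨hj0, hji⟩ := hl j (List.mem_cons_self)
    have hget_i : PySem.List.pyGetD (dp.set i c) (i : Int) 0 = c := by
      rw [PySem.List.pyGetD_natCast]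
      simp [List.getD, List.getElem?_set_self, hi]
    have hget_j : PySem.List.pyGetD (dp.set i c) j 0 = PySem.List.pyGetD dp j 0 := by
      rw [PySem.List.pyGetD_of_nonneg _ _ hj0, PySem.List.pyGetD_of_nonneg _ _ hj0]
      simp [List.getD, List.getElem?_set_ne (by omega : i ≠ j.toNat)]
    have hset : ∀ v : Int, PySem.List.pySetD (dp.set i c) (i : Int) v = dp.set i v := by
      intro v; rw [PySem.List.pySetD_natCast, List.set_set]
    rw [List.foldl_cons, List.foldl_cons]
    by_cases h : |xk - PySem.List.pyGetD nums j 0| ≤ k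
    · rw [if_pos h, if_pos h, hget_i, hget_j, hset,
        PySem.Int.mod_eq_emod_of_pos (by norm_num [pvM])]
      exact ih (fun j' hj' => hl j' (List.mem_cons_of_mem _ hj')) _
    · rw [if_neg h, if_neg h]
      exact ih (fun j' hj' => hl j' (List.mem_cons_of_mem _ hj')) _

theorem pv_outer (nums : List Int) (k : Int) : ∀ (m : Nat), m ≤ nums.length →
    (PySem.List.pyRange 0 (m : Int) 1).foldl (fun dp i =>
      (PySem.List.pyRange 0 i 1).foldl (fun dp j =>
        if |PySem.List.pyGetD nums i 0 - PySem.List.pyGetD nums j 0| ≤ k then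
          PySem.List.pySetD dp i
            (PySem.Int.mod (PySem.List.pyGetD dp i 0 + PySem.List.pyGetD dp j 0) pvM)
        else dp) dp) (List.replicate nums.length 1)
    = (pvPairs k (nums.take m)).map (·.2) ++ List.replicate (nums.length - m) 1 := by
  intro m
  induction m with
  | zero =>
    intro _
    rw [PySem.List.pyRange_one_eq_nil (by omega)]
    simp [pvPairs]
  | succ m ih =>
    intro hm
    have hmn : m < nums.length := by omega
    have hcast : ((m + 1 : Nat) : Int) = (m : Int) + 1 := by push_cast; ring
    rw [hcast, PySem.List.pyRange_one_succ_right (by positivity), List.foldl_append,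
      ih (by omega), List.foldl_cons, List.foldl_nil]
    set pairs := pvPairs k (nums.take m) with hpairs
    set P : List Int := pairs.map (·.2) with hP
    have hPlen : P.length = m := by
      rw [hP, List.length_map, hpairs, pvPairs_length, List.length_take]; omega
    have hrep : List.replicate (nums.length - m) (1:Int)
        = 1 :: List.replicate (nums.length - m - 1) 1 := by
      conv_lhs => rw [show nums.length - m = (nums.length - m - 1) + 1 by omega]
      rw [List.replicate_succ]
    set dpm : List Int := P ++ List.replicate (nums.length - m) 1 with hdpm
    have hdpm' : dpm = P ++ 1 :: List.replicate (nums.length - m - 1) 1 := by rw [hdpm, hrep]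
    have hdpmlen : m < dpm.length := by
      rw [hdpm']; simp [hPlen]
    have hset1 : dpm = dpm.set m (1:Int) := by
      rw [hdpm']
      conv_lhs => rw [← hPlen]
      simp [← hPlen]
    -- the outer step at index m
    rw [hset1]
    rw [pv_inner nums k (PySem.List.pyGetD nums (m : Int) 0) m dpm hdpmlen
      (PySem.List.pyRange 0 (m : Int) 1)
      (fun j hj => by
        rw [PySem.List.mem_pyRange_one] at hj
        exact ⟨hj.1, by omega⟩) 1]
    -- rewrite the scalar fold into a fold over pairs
    set xk := PySem.List.pyGetD nums (m : Int) 0 with hxkdef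
    have hplen' : pairs.length = m := by
      rw [hpairs, pvPairs_length, List.length_take]; omega
    have hcongr : (PySem.List.pyRange 0 (m : Int) 1).foldl
        (fun s j => if |xk - PySem.List.pyGetD nums j 0| ≤ k then
          (s + PySem.List.pyGetD dpm j 0) % pvM else s) 1
        = (PySem.List.pyRange 0 (m : Int) 1).foldl
        (fun s j => if |(PySem.List.pyGetD pairs j ((0:Int),(0:Int))).1 - xk| ≤ k then
          (s + (PySem.List.pyGetD pairs j ((0:Int),(0:Int))).2) % pvM else s) 1 := by
      apply PySem.List.foldl_congr_mem
      intro acc j hj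
      rw [PySem.List.mem_pyRange_one] at hj
      have hjt : j.toNat < m := by omega
      have hjl : j.toNat < nums.length := by omega
      have hpairget : PySem.List.pyGetD pairs j ((0:Int),(0:Int)) = pairs[j.toNat]'(by omega) := by
        rw [PySem.List.pyGetD_of_nonneg _ _ hj.1, List.getD_eq_getElem _ _ (by omega)]
      have hfst : (pairs[j.toNat]'(by omega)).1 = nums[j.toNat] := by
        have := pvPairs_fst k (nums.take m)
        rw [← hpairs] at this
        calc (pairs[j.toNat]'(by omega)).1
            = (pairs.map (·.1))[j.toNat]'(by simpa [hplen'] using hjt) := by simp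
          _ = (nums.take m)[j.toNat]'(by simp [List.length_take]; omega) := by
              congr 1
          _ = nums[j.toNat] := List.getElem_take
      have hsnd : PySem.List.pyGetD dpm j 0 = (pairs[j.toNat]'(by omega)).2 := by
        rw [PySem.List.pyGetD_of_nonneg _ _ hj.1, hdpm]
        rw [List.getD_eq_getElem _ _ (by simp [hPlen]; omega)]
        rw [List.getElem_append_left (by simp [hP, hplen']; omega)]
        simp [hP]
      have hnumj : PySem.List.pyGetD nums j 0 = nums[j.toNat] := by
        rw [PySem.List.pyGetD_of_nonneg _ _ hj.1, List.getD_eq_getElem _ _ hjl]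
      rw [hpairget, hfst, hsnd, hnumj, abs_sub_comm]
    rw [hcongr]
    have hrange : (m : Int) = ((pairs.length : Nat) : Int) := by rw [hplen']
    rw [hrange, PySem.List.foldl_pyRange_zero_pyGetD' pairs ((0:Int),(0:Int))
      (fun s p => if |p.1 - xk| ≤ k then (s + p.2) % pvM else s) 1]
    rw [pv_foldl_if_mod k _ pairs 1 (by norm_num) (by norm_num [pvM])]
    -- assemble the new prefix
    have hxk : xk = nums[m] := by
      rw [hxkdef, PySem.List.pyGetD_natCast, List.getD_eq_getElem _ _ hmn]
    have htake : nums.take (m + 1) = nums.take m ++ [nums[m]] :=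
      List.take_succ_eq_append_getElem hmn
    rw [htake, pvPairs_append_singleton, ← hpairs]
    have hstep : (pvStepP k pairs nums[m]).map (·.2)
        = P ++ [(1 + pvMatch k nums[m] pairs) % pvM] := by
      simp [pvStepP, hP]
    rw [hstep, hxk]
    set v : Int := (1 + pvMatch k nums[m] pairs) % pvM with hv
    rw [hdpm']
    rw [← hPlen]
    simp [List.set_append, Nat.sub_sub]
theorem a_char (nums : List Int) (k : Int) :
    numberOfStableSubsequences nums k = ((pvPairs k nums).map (·.2)).sum % pvM := by
  show PySem.Int.mod _ pvM = _
  rw [PySem.Int.mod_eq_emod_of_pos (by norm_num [pvM])]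
  rw [pv_outer nums k nums.length (le_refl _)]
  simp [List.take_length, ← List.sum_eq_foldl]

-- ===== VERDICT (by name: the statement is the Claim_ definition above) =====
theorem numberOfStableSubsequences_spec : Claim_equal_numberOfStableSubsequences := by
  intro nums k _
  unfold Spec_numberOfStableSubsequences
  rw [a_char, alt_char]
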